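-- pv_equiv track=rewrite | github.com/ShreyJ1729/Competitive-Programming | Hack-2-Connect3.0/main.py | reverseHalf
-- ===== SOURCE A (Python) =====
-- def reverseHalf(array):
--     odds = []
--     evens = []
--     for i in range(1, len(array), 2):
--         odds.append(array[i])
--     for i in range(0, len(array), 2):
--         evens.append(array[i])
--     evens = list(reversed(evens))
--     for i in range(len(array)):
--         if i%2==0:
--             array[i] = evens.pop()
--         else:
--             array[i] = odds.pop()
--     return array
-- ===== SOURCE B (Python) =====
-- def reverseHalf(array):
--     i = 1
--     j = len(array) - 1 if len(array) % 2 == 0 else len(array) - 2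
--     while i < j:
--         array[i], array[j] = array[j], array[i]
--         i += 2
--         j -= 2
--     return array
-- ===== Notes on version B (the rewrite author's own statement) =====
-- stated objective: simpler
-- what changed: Replaces the three auxiliary-list passes (collect odds, collect evens, reverse, pop-redistribute) with a single in-place two-pointer swap over the odd indices; even indices are never touched.
import Mathlib
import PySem

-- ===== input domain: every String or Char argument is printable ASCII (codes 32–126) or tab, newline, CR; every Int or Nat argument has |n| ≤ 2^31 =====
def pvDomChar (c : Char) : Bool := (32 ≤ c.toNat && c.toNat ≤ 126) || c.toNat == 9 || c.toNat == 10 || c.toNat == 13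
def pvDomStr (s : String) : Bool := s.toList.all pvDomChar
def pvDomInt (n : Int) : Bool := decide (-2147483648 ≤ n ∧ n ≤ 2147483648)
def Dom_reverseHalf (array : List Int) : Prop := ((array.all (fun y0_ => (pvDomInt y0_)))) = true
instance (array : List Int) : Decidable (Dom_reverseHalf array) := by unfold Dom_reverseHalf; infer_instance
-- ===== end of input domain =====

-- B replaces A's three auxiliary-list passes (collect odds, collect evens, reverse,
-- pop-redistribute) by an in-place two-pointer swap over the odd indices; the RETURN
-- value is proved equal (both Pythons also mutate the argument list in place alike).

-- ===== PORT A =====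
-- the body of A's final redistribution loop: pop from the end of evens/odds, write at i;
-- the 'none' branches are unreachable (both pops always succeed: the counts match exactly)
def stepA (st : List Int × List Int × List Int) (i : Int) : List Int × List Int × List Int :=
  if PySem.Int.mod i 2 = 0 then
    match PySem.List.pop? st.2.1 with
    | some (v, ev') => (PySem.List.pySetD st.1 i v, ev', st.2.2)
    | none => st
  else
    match PySem.List.pop? st.2.2 with
    | some (v, od') => (PySem.List.pySetD st.1 i v, st.2.1, od')
    | none => st

def reverseHalf (array : List Int) : List Int :=
  let odds := (PySem.List.pyRange 1 (array.length : Int) 2).foldl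
      (fun acc i => acc ++ [PySem.List.pyGetD array i 0]) []
  let evens := (PySem.List.pyRange 0 (array.length : Int) 2).foldl
      (fun acc i => acc ++ [PySem.List.pyGetD array i 0]) []
  let evens := evens.reverse
  ((PySem.List.pyRange 0 (array.length : Int) 1).foldl stepA (array, evens, odds)).1

-- ===== PORT B =====
-- while i < j: swap array[i], array[j]; i += 2; j -= 2
def swapLoop (arr : List Int) (i j : Int) : List Int :=
  if _h : i < j then
    swapLoop
      (PySem.List.pySetD (PySem.List.pySetD arr i (PySem.List.pyGetD arr j 0)) j
        (PySem.List.pyGetD arr i 0))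
      (i + 2) (j - 2)
  else arr
termination_by (j - i).toNat
decreasing_by omega

def reverseHalf_alt (array : List Int) : List Int :=
  let j : Int := if array.length % 2 = 0 then (array.length : Int) - 1 else (array.length : Int) - 2
  swapLoop array 1 j

-- ===== PRECONDITION & SPEC =====
def Spec_reverseHalf (array : List Int) (out : List Int) : Prop := out = reverseHalf_alt array
instance (array : List Int) (out : List Int) : Decidable (Spec_reverseHalf array out) := by unfold Spec_reverseHalf; infer_instance

-- ===== CLAIM (what is proved, stated in full; the proofs are below) =====
def Claim_equal_reverseHalf : Prop := ∀ (array : List Int), Dom_reverseHalf array → Spec_reverseHalf array (reverseHalf array)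

-- ===== LEMMAS AND PROOFS =====

theorem getD_set (l : List Int) (m t : Nat) (a : Int) (hm : m < l.length) :
    (l.set m a).getD t 0 = if t = m then a else l.getD t 0 := by
  rw [List.getD_eq_getElem?_getD, List.getD_eq_getElem?_getD, List.getElem?_set]
  rcases eq_or_ne t m with rfl | h
  · simp [hm]
  · simp [h, Ne.symm h]

theorem swapLoop_length (arr : List Int) (i j : Int) :
    (swapLoop arr i j).length = arr.length := by
  fun_induction swapLoop arr i j with
  | case1 arr i j h ih => rw [ih]; simp [PySem.List.length_pySetD]
  | case2 => rfl

theorem swapLoop_getD (arr : List Int) (i j : Int) :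
    0 < i → i % 2 = 1 → j % 2 = 1 → j < (arr.length : Int) →
    ∀ k : Nat, k < arr.length →
      (swapLoop arr i j).getD k 0 =
        if i ≤ (k : Int) ∧ (k : Int) ≤ j ∧ k % 2 = 1 then arr.getD (i + j - k).toNat 0
        else arr.getD k 0 := by
  fun_induction swapLoop arr i j with
  | case2 arr i j h =>
    intro hi hio hjo hj k hk
    split_ifs with hc
    · have : (k:Int) = i ∧ (k:Int) = j := by omega
      have : i + j - k = k := by omega
      simp [this]
    · rfl
  | case1 arr i j h ih =>
    intro hi hio hjo hj k hk
    have hlen : (PySem.List.pySetD (PySem.List.pySetD arr i (PySem.List.pyGetD arr j 0)) j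
        (PySem.List.pyGetD arr i 0)).length = arr.length := by
      simp [PySem.List.length_pySetD]
    rw [ih (by omega) (by omega) (by omega) (by omega) k (by omega)]
    have h0i : (0:Int) ≤ i := by omega
    have h0j : (0:Int) ≤ j := by omega
    rw [PySem.List.pySetD_of_nonneg _ _ h0i, PySem.List.pySetD_of_nonneg _ _ h0j,
        PySem.List.pyGetD_eq_getElem _ _ h0j hj, PySem.List.pyGetD_eq_getElem _ _ h0i (by omega)]
    have hjn : j.toNat < (arr.set i.toNat arr[j.toNat]).length := by simp; omega
    have hin : i.toNat < arr.length := by omega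
    split_ifs with hP hQ hQ
    · rw [getD_set _ _ _ _ hjn, getD_set _ _ _ _ hin, if_neg (by omega), if_neg (by omega)]
      congr 1
      omega
    · exfalso; omega
    · rw [getD_set _ _ _ _ hjn, getD_set _ _ _ _ hin]
      by_cases hkj : (k : Int) = j
      · rw [if_pos (by omega)]
        have he : (i + j - (k : Int)).toNat = i.toNat := by omega
        rw [he, List.getD_eq_getElem _ _ hin]
      · have hki : (k : Int) = i := by omega
        rw [if_neg (by omega), if_pos (by omega)]
        have he : (i + j - (k : Int)).toNat = j.toNat := by omega
        rw [he, List.getD_eq_getElem _ _ (by omega)]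
    · rw [getD_set _ _ _ _ hjn, getD_set _ _ _ _ hin, if_neg (by omega), if_neg (by omega)]

theorem alt_length (array : List Int) : (reverseHalf_alt array).length = array.length := by
  simp only [reverseHalf_alt]
  exact swapLoop_length _ _ _

theorem alt_getD (array : List Int) (k : Nat) (hk : k < array.length) :
    (reverseHalf_alt array).getD k 0 =
      if k % 2 = 1 then array.getD (2 * (array.length / 2) - k) 0 else array.getD k 0 := by
  simp only [reverseHalf_alt]
  by_cases hpar : array.length % 2 = 0
  · rw [if_pos hpar,
      swapLoop_getD array 1 _ (by omega) (by omega) (by omega) (by omega) k hk]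
    split_ifs with hA hB hB
    · congr 1; omega
    · exfalso; omega
    · exfalso; omega
    · rfl
  · rw [if_neg hpar,
      swapLoop_getD array 1 _ (by omega) (by omega) (by omega) (by omega) k hk]
    split_ifs with hA hB hB
    · congr 1; omega
    · exfalso; omega
    · exfalso; omega
    · rfl

theorem loopA_getD (evens odds : List Int) (n : Nat)
    (hq : evens.length = (n + 1) / 2) (hp : odds.length = n / 2) :
    ∀ (m i : Nat) (arr : List Int), arr.length = n → i + m = n →
      ((PySem.List.pyRange (i : Int) (n : Int) 1).foldl stepA
          (arr, (evens.drop ((i + 1) / 2)).reverse, odds.take (odds.length - i / 2))).1.length = n ∧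
      ∀ k : Nat, k < n →
        ((PySem.List.pyRange (i : Int) (n : Int) 1).foldl stepA
            (arr, (evens.drop ((i + 1) / 2)).reverse, odds.take (odds.length - i / 2))).1.getD k 0 =
          if k < i then arr.getD k 0
          else if k % 2 = 0 then evens.getD (k / 2) 0
          else odds.getD (odds.length - 1 - (k - 1) / 2) 0 := by
  intro m
  induction m with
  | zero =>
    intro i arr hlen hin
    rw [PySem.List.pyRange_one_eq_nil (by omega)]
    simp only [List.foldl_nil]
    refine ⟨hlen, fun k hk => ?_⟩
    rw [if_pos (by omega)]
  | succ m ih =>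
    intro i arr hlen hin
    have hilt : i < n := by omega
    rw [PySem.List.pyRange_one_cons (by exact_mod_cast hilt)]
    simp only [List.foldl_cons]
    by_cases hpar : i % 2 = 0
    · -- even index: pop from the reversed evens
      have he : (i + 1) / 2 < evens.length := by omega
      have hstep : stepA (arr, (evens.drop ((i + 1) / 2)).reverse, odds.take (odds.length - i / 2)) (i : Int)
          = (arr.set i (evens.getD ((i + 1) / 2) 0), (evens.drop ((i + 1) / 2 + 1)).reverse,
             odds.take (odds.length - i / 2)) := by
        unfold stepA
        rw [if_pos (by rw [PySem.Int.mod_eq_emod_of_pos (by omega)]; omega)]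
        simp only [List.drop_eq_getElem_cons he, List.reverse_cons, PySem.List.pop?_last,
          List.getD_eq_getElem _ _ he]
        rw [PySem.List.pySetD_of_nonneg _ _ (Int.natCast_nonneg i), Int.toNat_natCast]
      rw [hstep]
      have hmain := ih (i + 1) (arr.set i (evens.getD ((i + 1) / 2) 0)) (by simp [hlen]) (by omega)
      rw [show odds.length - (i + 1) / 2 = odds.length - i / 2 by omega,
          show (i + 1 + 1) / 2 = (i + 1) / 2 + 1 by omega] at hmain
      push_cast at hmain ⊢
      refine ⟨hmain.1, fun k hk => ?_⟩
      rw [hmain.2 k hk]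
      by_cases hki : k < i
      · rw [if_pos (by omega), if_pos hki, getD_set _ _ _ _ (by omega), if_neg (by omega)]
      · by_cases hkei : k = i
        · subst hkei
          rw [if_pos (by omega), getD_set _ _ _ _ (by omega), if_pos rfl,
              if_neg (by omega), if_pos hpar]
          congr 1
          omega
        · rw [if_neg (show ¬ k < i + 1 by omega), if_neg (show ¬ k < i by omega)]
    · -- odd index: pop from the tail of odds
      have hr : i / 2 < odds.length := by omega
      have hr1 : odds.length - i / 2 = (odds.length - i / 2 - 1) + 1 := by omega
      have hstep : stepA (arr, (evens.drop ((i + 1) / 2)).reverse, odds.take (odds.length - i / 2)) (i : Int)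
          = (arr.set i (odds.getD (odds.length - i / 2 - 1) 0), (evens.drop ((i + 1) / 2)).reverse,
             odds.take (odds.length - i / 2 - 1)) := by
        unfold stepA
        rw [if_neg (by rw [PySem.Int.mod_eq_emod_of_pos (by omega)]; omega)]
        rw [hr1, List.take_add_one, List.getElem?_eq_getElem (by omega)]
        simp only [Option.toList_some, PySem.List.pop?_last, Nat.add_sub_cancel,
          List.getD_eq_getElem _ _ (by omega : odds.length - i / 2 - 1 < odds.length)]
        rw [PySem.List.pySetD_of_nonneg _ _ (Int.natCast_nonneg i), Int.toNat_natCast]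
      rw [hstep]
      have hmain := ih (i + 1) (arr.set i (odds.getD (odds.length - i / 2 - 1) 0)) (by simp [hlen]) (by omega)
      rw [show odds.length - (i + 1) / 2 = odds.length - i / 2 - 1 by omega,
          show (i + 1 + 1) / 2 = (i + 1) / 2 by omega] at hmain
      push_cast at hmain ⊢
      refine ⟨hmain.1, fun k hk => ?_⟩
      rw [hmain.2 k hk]
      by_cases hki : k < i
      · rw [if_pos (by omega), if_pos hki, getD_set _ _ _ _ (by omega), if_neg (by omega)]
      · by_cases hkei : k = i
        · subst hkei
          rw [if_pos (by omega), getD_set _ _ _ _ (by omega), if_pos rfl,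
              if_neg (by omega), if_neg (by omega)]
          congr 1
          omega
        · rw [if_neg (show ¬ k < i + 1 by omega), if_neg (show ¬ k < i by omega)]

def oddsOf (array : List Int) : List Int :=
  (List.range (array.length / 2)).map (fun t => array.getD (2 * t + 1) 0)

def evensOf (array : List Int) : List Int :=
  (List.range ((array.length + 1) / 2)).map (fun t => array.getD (2 * t) 0)

theorem odds_eq (array : List Int) :
    (PySem.List.pyRange 1 (array.length : Int) 2).foldl
      (fun acc i => acc ++ [PySem.List.pyGetD array i 0]) [] = oddsOf array := by
  rw [PySem.List.foldl_append_singleton_eq_map, PySem.List.pyRange_of_pos _ _ (by omega),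
    List.map_map, List.nil_append]
  rw [show (if (1:Int) < (array.length : Int) then (((array.length:Int) - 1 + 2 - 1) / 2).toNat else 0)
      = array.length / 2 by split_ifs <;> omega]
  exact List.map_congr_left (fun t _ => by
    show PySem.List.pyGetD array (1 + 2 * (t:Int)) 0 = _
    rw [show (1 + 2 * (t:Int)) = ((2 * t + 1 : Nat) : Int) by push_cast; ring,
      PySem.List.pyGetD_natCast])

theorem evens_eq (array : List Int) :
    (PySem.List.pyRange 0 (array.length : Int) 2).foldl
      (fun acc i => acc ++ [PySem.List.pyGetD array i 0]) [] = evensOf array := by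
  rw [PySem.List.foldl_append_singleton_eq_map, PySem.List.pyRange_of_pos _ _ (by omega),
    List.map_map, List.nil_append]
  rw [show (if (0:Int) < (array.length : Int) then (((array.length:Int) - 0 + 2 - 1) / 2).toNat else 0)
      = (array.length + 1) / 2 by split_ifs <;> omega]
  exact List.map_congr_left (fun t _ => by
    show PySem.List.pyGetD array (0 + 2 * (t:Int)) 0 = _
    rw [show (0 + 2 * (t:Int)) = ((2 * t : Nat) : Int) by push_cast; ring,
      PySem.List.pyGetD_natCast])

theorem a_main (array : List Int) :
    (reverseHalf array).length = array.length ∧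
    ∀ k : Nat, k < array.length →
      (reverseHalf array).getD k 0 =
        if k % 2 = 1 then array.getD (2 * (array.length / 2) - k) 0 else array.getD k 0 := by
  have h := loopA_getD (evensOf array) (oddsOf array) array.length
    (by simp [evensOf]) (by simp [oddsOf]) array.length 0 array rfl (by omega)
  rw [show (0 + 1) / 2 = 0 from rfl, List.drop_zero,
    Nat.sub_zero, List.take_length, Nat.cast_zero] at h
  have hrw : reverseHalf array =
      ((PySem.List.pyRange 0 (array.length : Int) 1).foldl stepA
        (array, (evensOf array).reverse, oddsOf array)).1 := by
    simp only [reverseHalf, odds_eq, evens_eq]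
  constructor
  · rw [hrw]; exact h.1
  · intro k hk
    rw [hrw, h.2 k hk, if_neg (by omega)]
    by_cases hpar : k % 2 = 0
    · rw [if_pos hpar, if_neg (by omega), evensOf,
        PySem.List.getD_map_range _ _ _ _ (by omega)]
      congr 1
      omega
    · have hlp : (oddsOf array).length = array.length / 2 := by simp [oddsOf]
      rw [if_neg hpar, if_pos (by omega), hlp, oddsOf,
        PySem.List.getD_map_range _ _ _ _ (by omega)]
      congr 1
      omega

-- ===== VERDICT (by name: the statement is the Claim_ definition above) =====
theorem reverseHalf_spec : Claim_equal_reverseHalf := by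
  intro array _
  unfold Spec_reverseHalf
  apply List.ext_getElem
  · rw [(a_main array).1, alt_length]
  · intro k h1 h2
    have hk : k < array.length := by rw [(a_main array).1] at h1; exact h1
    rw [← List.getD_eq_getElem _ 0 h1, ← List.getD_eq_getElem _ 0 h2,
      (a_main array).2 k hk, alt_getD array k hk]
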